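-- pv_equiv track=rewrite | github.com/STEVE-916-create/Uhhhhhh | tools/allinone.py | split_lua_table_elements
-- ===== SOURCE A (Python) =====
-- def split_lua_table_elements(table_content):
--     elements = []
--     i = 0
--     n = len(table_content)
--     current = ''
--     in_string = False
--     quote_char = None
--     while i < n:
--         c = table_content[i]
--         if not in_string and c in ('"', "'"):
--             in_string = True
--             quote_char = c
--             current += c
--         elif in_string and c == quote_char:
--             in_string = False
--             quote_char = None
--             current += c
--         elif not in_string and c == ',':
--             elements.append(current.strip())
--             current = ''
--         else:
--             current += c
--         i += 1
--     if current.strip():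
--         elements.append(current.strip())
--     return elements
-- ===== SOURCE B (Python) =====
-- def split_lua_table_elements(table_content):
--     # One pass records the indices of commas outside strings; segments are
--     # then sliced out of the original text and stripped.
--     cuts = []
--     in_string = False
--     quote = None
--     for i, c in enumerate(table_content):
--         if in_string:
--             if c == quote:
--                 in_string = False
--                 quote = None
--         elif c in ('"', "'"):
--             in_string = True
--             quote = c
--         elif c == ',':
--             cuts.append(i)
--     segs = []
--     start = 0
--     for j in cuts:
--         segs.append(table_content[start:j].strip())
--         start = j + 1
--     last = table_content[start:].strip()
--     if last:
--         segs.append(last)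
--     return segs
-- ===== Notes on version B (the rewrite author's own statement) =====
-- stated objective: alternative
-- what changed: Instead of accumulating each element character by character in a growing 'current' buffer, B's scan only records the indices of commas outside quoted strings, then slices the original text at those boundaries and strips each segment (dropping a trailing segment that strips to empty, as the split naturally leaves).
import Mathlib
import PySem

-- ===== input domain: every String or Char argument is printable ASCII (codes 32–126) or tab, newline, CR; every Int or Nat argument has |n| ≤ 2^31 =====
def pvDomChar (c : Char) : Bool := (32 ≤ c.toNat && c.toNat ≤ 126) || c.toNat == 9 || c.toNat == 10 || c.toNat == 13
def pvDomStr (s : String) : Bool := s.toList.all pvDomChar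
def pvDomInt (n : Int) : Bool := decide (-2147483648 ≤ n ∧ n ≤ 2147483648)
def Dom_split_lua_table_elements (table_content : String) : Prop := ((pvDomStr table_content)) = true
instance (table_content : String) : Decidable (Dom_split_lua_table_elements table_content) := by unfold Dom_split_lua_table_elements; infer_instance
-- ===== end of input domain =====

-- B records comma positions in one scan, then slices and strips the segments; an alternative decomposition, no speed claim.

-- ===== PORT A =====
-- A's while loop over the characters, with its state (elements, current, in_string, quote_char).
def pvA_loop : List Char → List String → List Char → Bool → Option Char → List String
  | [], elements, current, _, _ =>
      if PySem.Chars.strip current ≠ [] then elements ++ [String.ofList (PySem.Chars.strip current)]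
      else elements
  | c :: rest, elements, current, in_string, quote_char =>
      if ¬ in_string = true ∧ (c = '"' ∨ c = '\'') then
        pvA_loop rest elements (current ++ [c]) true (some c)
      else if in_string = true ∧ some c = quote_char then
        pvA_loop rest elements (current ++ [c]) false none
      else if ¬ in_string = true ∧ c = ',' then
        pvA_loop rest (elements ++ [String.ofList (PySem.Chars.strip current)]) [] in_string quote_char
      else
        pvA_loop rest elements (current ++ [c]) in_string quote_char

def split_lua_table_elements (table_content : String) : List String :=
  pvA_loop table_content.toList [] [] false none

-- ===== PORT B =====
-- first loop of Source B: collect the indices of commas outside strings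
def pvB_scan : List (Int × Char) → List Int → Bool → Option Char → List Int
  | [], cuts, _, _ => cuts
  | (i, c) :: rest, cuts, in_string, quote =>
      if in_string = true then
        if some c = quote then pvB_scan rest cuts false none
        else pvB_scan rest cuts in_string quote
      else if c = '"' ∨ c = '\'' then pvB_scan rest cuts true (some c)
      else if c = ',' then pvB_scan rest (cuts ++ [i]) in_string quote
      else pvB_scan rest cuts in_string quote

def split_lua_table_elements_alt (table_content : String) : List String :=
  let chars := table_content.toList
  let cuts := pvB_scan (PySem.List.enumerate chars 0) [] false none
  -- second loop of Source B: slice out and strip each segment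
  let p := cuts.foldl
    (fun (st : List String × Int) j =>
      (st.1 ++ [String.ofList (PySem.Chars.strip (PySem.List.slice chars (some st.2) (some j)))], j + 1))
    ([], 0)
  let last := PySem.Chars.strip (PySem.List.slice chars (some p.2) none)
  if last ≠ [] then p.1 ++ [String.ofList last] else p.1

-- ===== PRECONDITION & SPEC =====
def Spec_split_lua_table_elements (table_content : String) (out : List String) : Prop := out = split_lua_table_elements_alt table_content
instance (table_content : String) (out : List String) : Decidable (Spec_split_lua_table_elements table_content out) := by unfold Spec_split_lua_table_elements; infer_instance

-- ===== CLAIM (what is proved, stated in full; the proofs are below) =====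
def Claim_equal_split_lua_table_elements : Prop := ∀ (table_content : String), Dom_split_lua_table_elements table_content → Spec_split_lua_table_elements table_content (split_lua_table_elements table_content)

-- ===== LEMMAS AND PROOFS =====

-- proof-side recursive form of B's second loop plus the final conditional append
def pvFinish (full : List Char) : List Int → Int → List String → List String
  | [], start, acc =>
      let last := PySem.Chars.strip (PySem.List.slice full (some start) none)
      if last ≠ [] then acc ++ [String.ofList last] else acc
  | j :: rest, start, acc =>
      pvFinish full rest (j + 1)
        (acc ++ [String.ofList (PySem.Chars.strip (PySem.List.slice full (some start) (some j)))])

theorem pvFinish_eq_foldl (full : List Char) (cuts : List Int) (start : Int) (acc : List String) :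
    pvFinish full cuts start acc =
      (let p := cuts.foldl
          (fun (st : List String × Int) j =>
            (st.1 ++ [String.ofList (PySem.Chars.strip (PySem.List.slice full (some st.2) (some j)))], j + 1))
          (acc, start)
       let last := PySem.Chars.strip (PySem.List.slice full (some p.2) none)
       if last ≠ [] then p.1 ++ [String.ofList last] else p.1) := by
  induction cuts generalizing start acc with
  | nil => simp [pvFinish]
  | cons j rest ih => simp [pvFinish, ih]

theorem pvB_scan_acc (rest : List (Int × Char)) (cuts : List Int) (ins : Bool) (q : Option Char) :
    pvB_scan rest cuts ins q = cuts ++ pvB_scan rest [] ins q := by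
  induction rest generalizing cuts ins q with
  | nil => simp [pvB_scan]
  | cons p rest ih =>
      obtain ⟨i, c⟩ := p
      simp only [pvB_scan]
      split_ifs
      · exact ih cuts false none
      · exact ih cuts ins q
      · exact ih cuts true (some c)
      · rw [ih (cuts ++ [i]), ih ([] ++ [i])]; simp
      · exact ih cuts ins q

theorem pv_take_drop_succ (full : List Char) (i start : Nat) (c : Char)
    (hi : i < full.length) (hc : full[i] = c) (hstart : start ≤ i) :
    (full.take (i + 1)).drop start = (full.take i).drop start ++ [c] := by
  rw [List.take_succ, List.getElem?_eq_getElem hi, hc]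
  simp only [Option.toList_some]
  rw [List.drop_append_of_le_length (by simp [List.length_take]; omega)]

theorem pv_main (full : List Char) : ∀ (rest : List Char) (i start : Nat) (ins : Bool) (q : Option Char),
    full.drop i = rest → start ≤ i → ins = q.isSome → ∀ elements : List String,
    pvA_loop rest elements ((full.take i).drop start) ins q =
      pvFinish full (pvB_scan (PySem.List.enumerate rest (i : Int)) [] ins q) (start : Int) elements := by
  intro rest
  induction rest with
  | nil =>
      intro i start ins q hfull hstart hins elements
      have hlen : full.length ≤ i := by
        by_contra h
        push_neg at h
        rw [List.drop_eq_nil_iff] at hfull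
        omega
      simp only [PySem.List.enumerate_nil, pvB_scan, pvA_loop, pvFinish]
      rw [PySem.List.slice_from_natCast, List.take_of_length_le hlen]
  | cons c rest ih =>
      intro i start ins q hfull hstart hins elements
      have hi : i < full.length := by
        by_contra h
        push_neg at h
        rw [List.drop_eq_nil_iff.mpr h] at hfull
        exact List.cons_ne_nil _ _ hfull.symm
      have hdrop := List.drop_eq_getElem_cons hi
      rw [hfull] at hdrop
      have hc : full[i] = c := by exact (List.cons.injEq _ _ _ _ ▸ hdrop.symm).1
      have hrest : full.drop (i + 1) = rest := by
        have := hdrop.symm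
        rw [List.drop_eq_getElem_cons hi] at hfull
        exact (List.cons.injEq _ _ _ _ ▸ hfull).2
      have hcast : (i : Int) + 1 = ((i + 1 : Nat) : Int) := by push_cast; ring
      rw [PySem.List.enumerate_cons, hcast]
      cases q with
      | none =>
          simp only [Option.isSome_none] at hins
          subst hins
          by_cases hq : c = '"' ∨ c = '\''
          · simp only [pvA_loop, pvB_scan, hq, Bool.false_eq_true, not_false_iff, true_and,
              if_true, if_false, ite_true, ite_false, reduceIte]
            rw [← pv_take_drop_succ full i start c hi hc hstart]
            exact ih (i + 1) start true (some c) hrest (by omega) rfl elements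
          · by_cases hcomma : c = ','
            · subst hcomma
              simp only [pvA_loop, pvB_scan, hq, Bool.false_eq_true, not_false_iff,
                true_and, if_true, if_false, ite_true, ite_false, ite_self, reduceIte]
              rw [pvB_scan_acc]
              simp only [List.nil_append, List.singleton_append, pvFinish]
              have hseg : PySem.List.slice full (some (start : Int)) (some (i : Int)) =
                  (full.take i).drop start := by
                rw [PySem.List.slice_natCast, List.drop_take]
              rw [hseg, hcast]
              have hcur : (full.take (i + 1)).drop (i + 1) = [] := by
                apply List.drop_eq_nil_iff.mpr
                simp [List.length_take]
              rw [← hcur]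
              exact ih (i + 1) (i + 1) false none hrest (le_refl _) rfl _
            · simp only [pvA_loop, pvB_scan, hq, hcomma, Bool.false_eq_true, not_false_iff,
                true_and, if_true, if_false, ite_true, ite_false, ite_self, reduceIte]
              rw [← pv_take_drop_succ full i start c hi hc hstart]
              exact ih (i + 1) start false none hrest (by omega) rfl elements
      | some qc =>
          simp only [Option.isSome_some] at hins
          subst hins
          by_cases hc2 : c = qc
          · subst hc2
            simp only [pvA_loop, pvB_scan, if_true, if_false, ite_true, ite_false, reduceIte]
            simp only [not_true, false_and, if_false, and_self, if_true, reduceIte]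
            rw [← pv_take_drop_succ full i start c hi hc hstart]
            exact ih (i + 1) start false none hrest (by omega) rfl elements
          · have hne : ¬ (some c = some qc) := by simp [hc2]
            simp only [pvA_loop, pvB_scan, hne, not_true, false_and, true_and, and_false,
              if_false, ite_false, reduceIte]
            rw [← pv_take_drop_succ full i start c hi hc hstart]
            exact ih (i + 1) start true (some qc) hrest (by omega) rfl elements

-- ===== VERDICT (by name: the statement is the Claim_ definition above) =====
theorem split_lua_table_elements_spec : Claim_equal_split_lua_table_elements := by
  intro s _
  unfold Spec_split_lua_table_elements split_lua_table_elements split_lua_table_elements_alt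
  have h := pv_main s.toList s.toList 0 0 false none (by simp) (le_refl 0) rfl []
  simp only [List.take_zero, List.drop_nil, Int.natCast_zero] at h
  rw [h, pvFinish_eq_foldl]
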